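-- pv_equiv track=rewrite | github.com/daviddekoning/usd-parquet | tests/benchmarks/generate_test_data.py | generate_paths
-- ===== SOURCE A (Python) =====
-- def generate_paths(n: int, hierarchy: str) -> list[str]:
--     """Generate prim paths based on hierarchy pattern."""
--     if hierarchy == "flat":
--         return [f"/World/Prim_{i}" for i in range(n)]
--     elif hierarchy == "deep":
--         # 4-level deep hierarchy: Zone/Level/Room/Component
--         paths = []
--         zones = max(1, n // 1000)
--         levels = 10
--         rooms = 10
--         components_per_room = max(1, n // (zones * levels * rooms))
--
--         idx = 0
--         for z in range(zones):
--             for l in range(levels):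
--                 for r in range(rooms):
--                     for c in range(components_per_room):
--                         if idx >= n:
--                             break
--                         paths.append(
--                             f"/World/Zone_{z}/Level_{l}/Room_{r}/Component_{c}"
--                         )
--                         idx += 1
--                     if idx >= n:
--                         break
--                 if idx >= n:
--                     break
--             if idx >= n:
--                 break
--
--         # Fill remaining if needed
--         while len(paths) < n:
--             paths.append(f"/World/Extra/Prim_{len(paths)}")
--
--         return paths[:n]
--     else:
--         raise ValueError(f"Unknown hierarchy: {hierarchy}")
-- ===== SOURCE B (Python) =====
-- def generate_paths(n: int, hierarchy: str) -> list[str]: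
--     """Generate prim paths based on hierarchy pattern."""
--     if hierarchy == "flat":
--         return [f"/World/Prim_{i}" for i in range(n)]
--     elif hierarchy == "deep":
--         zones = max(1, n // 1000)
--         components_per_room = max(1, n // (zones * 100))
--         total = zones * 100 * components_per_room
--         paths = []
--         for idx in range(min(n, total)):
--             c = idx % components_per_room
--             rest = idx // components_per_room
--             r = rest % 10
--             rest //= 10
--             l = rest % 10
--             z = rest // 10
--             paths.append(f"/World/Zone_{z}/Level_{l}/Room_{r}/Component_{c}")
--         for i in range(len(paths), n):
--             paths.append(f"/World/Extra/Prim_{i}")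
--         return paths
--     else:
--         raise ValueError(f"Unknown hierarchy: {hierarchy}")
-- ===== Notes on version B (the rewrite author's own statement) =====
-- stated objective: simpler
-- what changed: The four nested loops with break flags of the deep branch are replaced by one flat loop over range(min(n, total)) that decodes z/l/r/c by divmod arithmetic, and the while-fill by a range fill.
import Mathlib
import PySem

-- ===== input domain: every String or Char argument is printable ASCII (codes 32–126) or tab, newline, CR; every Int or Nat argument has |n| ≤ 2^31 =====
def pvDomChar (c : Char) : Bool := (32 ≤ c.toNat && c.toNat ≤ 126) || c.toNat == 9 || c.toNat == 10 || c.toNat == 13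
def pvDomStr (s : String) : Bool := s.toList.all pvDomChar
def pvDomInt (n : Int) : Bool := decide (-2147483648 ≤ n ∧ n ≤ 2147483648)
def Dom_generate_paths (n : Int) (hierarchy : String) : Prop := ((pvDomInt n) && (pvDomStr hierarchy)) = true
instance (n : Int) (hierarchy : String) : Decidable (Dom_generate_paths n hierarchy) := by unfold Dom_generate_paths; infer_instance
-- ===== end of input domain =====

-- B replaces A's four nested loops with break flags (deep branch) by one flat loop over
-- range(min(n, total)) that decodes z/l/r/c by divmod arithmetic; objective: simpler.

-- f-string helpers shared by both ports (both Pythons build the identical strings)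
def pvDeepPath (z l r c : Int) : String :=
  "/World/Zone_" ++ PySem.Int.toStr z ++ "/Level_" ++ PySem.Int.toStr l ++
    "/Room_" ++ PySem.Int.toStr r ++ "/Component_" ++ PySem.Int.toStr c

def pvExtraPath (i : Int) : String := "/World/Extra/Prim_" ++ PySem.Int.toStr i

-- ===== PORT A =====
-- innermost `for c in range(...)` loop: checks `if idx >= n: break` before appending
def aLoopC (n : Int) (f : Int → String) : List Int → List String × Int → List String × Int
  | [], st => st
  | c :: rest, st =>
      if st.2 ≥ n then st else aLoopC n f rest (st.1 ++ [f c], st.2 + 1)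

-- a `for` loop whose body is `inner` followed by `if idx >= n: break` (the r/l/z levels)
def aBreakLoop (n : Int) (inner : Int → List String × Int → List String × Int) :
    List Int → List String × Int → List String × Int
  | [], st => st
  | x :: rest, st =>
      let st' := inner x st
      if st'.2 ≥ n then st' else aBreakLoop n inner rest st'

-- `while len(paths) < n: paths.append(f"/World/Extra/Prim_{len(paths)}")`
def aFill (n : Int) (paths : List String) : List String :=
  if _h : (paths.length : Int) < n then aFill n (paths ++ [pvExtraPath paths.length])
  else paths
termination_by (n - paths.length).toNat
decreasing_by simp only [List.length_append, List.length_cons, List.length_nil]; omega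

def aDeep (n : Int) : List String :=
  let zones := max 1 (PySem.Int.floordiv n 1000)
  let levels : Int := 10
  let rooms : Int := 10
  let cpr := max 1 (PySem.Int.floordiv n (zones * levels * rooms))
  let st := aBreakLoop n (fun z st =>
      aBreakLoop n (fun l st =>
        aBreakLoop n (fun r st =>
          aLoopC n (fun c => pvDeepPath z l r c) (PySem.List.pyRange 0 cpr) st)
        (PySem.List.pyRange 0 rooms) st)
      (PySem.List.pyRange 0 levels) st)
    (PySem.List.pyRange 0 zones) ([], 0)
  PySem.List.slice (aFill n st.1) none (some n)

def generate_paths (n : Int) (hierarchy : String) : List String :=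
  if hierarchy = "flat" then
    (PySem.List.pyRange 0 n).map (fun i => "/World/Prim_" ++ PySem.Int.toStr i)
  else if hierarchy = "deep" then
    aDeep n
  else []  -- Python raises ValueError here: excluded by Pre_generate_paths

-- ===== PORT B =====
def bDeep (n : Int) : List String :=
  let zones := max 1 (PySem.Int.floordiv n 1000)
  let cpr := max 1 (PySem.Int.floordiv n (zones * 100))
  let total := zones * 100 * cpr
  let body := (PySem.List.pyRange 0 (min n total)).map (fun idx =>
    let c := PySem.Int.mod idx cpr
    let rest := PySem.Int.floordiv idx cpr
    let r := PySem.Int.mod rest 10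
    let rest2 := PySem.Int.floordiv rest 10
    let l := PySem.Int.mod rest2 10
    let z := PySem.Int.floordiv rest2 10
    pvDeepPath z l r c)
  body ++ (PySem.List.pyRange (body.length : Int) n).map pvExtraPath

def generate_paths_alt (n : Int) (hierarchy : String) : List String :=
  if hierarchy = "flat" then
    (PySem.List.pyRange 0 n).map (fun i => "/World/Prim_" ++ PySem.Int.toStr i)
  else if hierarchy = "deep" then
    bDeep n
  else []  -- Python raises ValueError here: excluded by Pre_generate_paths

-- ===== PRECONDITION & SPEC =====
-- Pre_ excludes exactly the inputs on which A (and B) raise ValueError: any hierarchy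
-- other than "flat" or "deep".
def Pre_generate_paths (n : Int) (hierarchy : String) : Prop :=
  hierarchy = "flat" ∨ hierarchy = "deep"
instance (n : Int) (hierarchy : String) : Decidable (Pre_generate_paths n hierarchy) := by
  unfold Pre_generate_paths; infer_instance

def pvWitness_generate_paths : Int × String := (7, "deep")

def Spec_generate_paths (n : Int) (hierarchy : String) (out : List String) : Prop :=
  out = generate_paths_alt n hierarchy
instance (n : Int) (hierarchy : String) (out : List String) :
    Decidable (Spec_generate_paths n hierarchy out) := by unfold Spec_generate_paths; infer_instance

-- ===== CLAIM (what is proved, stated in full; the proofs are below) =====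
def Claim_equal_generate_paths : Prop := ∀ (n : Int) (hierarchy : String),
  Dom_generate_paths n hierarchy → Pre_generate_paths n hierarchy →
    Spec_generate_paths n hierarchy (generate_paths n hierarchy)

-- ===== LEMMAS AND PROOFS =====

-- the innermost loop appends the first (n - idx) of its block and advances idx accordingly
theorem aLoopC_eq (n : Int) (f : Int → String) (cs : List Int) (p : List String) (i : Int) :
    aLoopC n f cs (p, i) =
      (p ++ (cs.map f).take (n - i).toNat, i + ((min cs.length (n - i).toNat : Nat) : Int)) := by
  induction cs generalizing p i with
  | nil => simp [aLoopC]
  | cons c rest ih =>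
      rw [aLoopC]
      by_cases hbr : i ≥ n
      · have h0 : (n - i).toNat = 0 := by omega
        simp [hbr, h0]
      · have h0 : (n - i).toNat = (n - (i+1)).toNat + 1 := by omega
        simp only [hbr, if_false, ih, List.map_cons, h0, List.take_succ_cons,
          List.length_cons, List.append_assoc, List.singleton_append]
        refine Prod.ext rfl ?_
        simp only []
        omega
theorem aBreakLoop_eq (n : Int) (inner : Int → List String × Int → List String × Int)
    (g : Int → List String)
    (hinner : ∀ x p i, inner x (p, i) =
      (p ++ (g x).take (n - i).toNat, i + ((min (g x).length (n - i).toNat : Nat) : Int)))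
    (xs : List Int) (p : List String) (i : Int) :
    aBreakLoop n inner xs (p, i) =
      (p ++ (xs.flatMap g).take (n - i).toNat,
       i + ((min (xs.flatMap g).length (n - i).toNat : Nat) : Int)) := by
  induction xs generalizing p i with
  | nil => simp [aBreakLoop]
  | cons x rest ih =>
      rw [aBreakLoop]
      simp only [hinner, List.flatMap_cons]
      set G := (g x).length with hG
      set K := (n - i).toNat with hK
      by_cases hbr : i + ((min G K : Nat) : Int) ≥ n
      · rw [if_pos hbr]
        have hKG : K ≤ G := by omega
        rw [List.take_append_of_le_length (hG ▸ hKG)]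
        refine Prod.ext rfl ?_
        simp only [List.length_append]
        congr 2
        omega
      · have hGK : min G K = G := by omega
        have hGltK : G ≤ K := by omega
        rw [if_neg hbr, ih, hGK]
        rw [List.take_append, List.take_of_length_le (hG ▸ hGltK)]
        refine Prod.ext ?_ ?_
        · simp only [List.append_assoc]
          congr 3
          omega
        · simp only [List.length_append]
          omega
theorem aFill_eq (n : Int) (p : List String) :
    aFill n p = p ++ (PySem.List.pyRange (p.length : Int) n).map pvExtraPath := by
  fun_induction aFill n p with
  | case1 p h ih =>
      rw [ih, PySem.List.pyRange_one_cons h]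
      simp [List.append_assoc]
  | case2 p h =>
      rw [PySem.List.pyRange_one_eq_nil (by omega)]
      simp
theorem flatMap_range_const {α : Type} (Z M : Nat) (g : Nat → Nat → α) :
    (List.range Z).flatMap (fun z => (List.range M).map (g z)) =
      (List.range (Z * M)).map (fun i => g (i / M) (i % M)) := by
  induction Z with
  | zero => simp
  | succ Z ih =>
      rw [List.range_succ, List.flatMap_append, ih, Nat.succ_mul, List.range_add,
        List.map_append, List.map_map]
      congr 1
      simp only [List.flatMap_cons, List.flatMap_nil, List.append_nil, List.map_inj_left,
        List.mem_range]
      intro j hj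
      simp only [Function.comp]
      have h1 : (Z * M + j) / M = Z := by
          rw [Nat.mul_comm Z M, Nat.mul_add_div (show 0 < M by omega), Nat.div_eq_of_lt hj, Nat.add_zero]
      have h2 : (Z * M + j) % M = j := by
        rw [Nat.mul_comm Z M, Nat.mul_add_mod, Nat.mod_eq_of_lt hj]
      rw [h1, h2]

def gC (cpr z l r : Int) : List String := (PySem.List.pyRange 0 cpr).map (pvDeepPath z l r)
def gR (cpr z l : Int) : List String := (PySem.List.pyRange 0 (10:Int)).flatMap (gC cpr z l)
def gL (cpr z : Int) : List String := (PySem.List.pyRange 0 (10:Int)).flatMap (gR cpr z)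
def fullList (zones cpr : Int) : List String := (PySem.List.pyRange 0 zones).flatMap (gL cpr)
def dN (Cn i : Nat) : String :=
  pvDeepPath ((i / Cn / 10 / 10 : Nat) : Int) ((i / Cn / 10 % 10 : Nat) : Int)
    ((i / Cn % 10 : Nat) : Int) ((i % Cn : Nat) : Int)

theorem fullList_eq (Zn Cn : Nat) :
    fullList ((Zn : Nat) : Int) ((Cn : Nat) : Int) = (List.range (Zn * 100 * Cn)).map (dN Cn) := by
  unfold fullList gL gR gC
  have h10 : PySem.List.pyRange 0 (10 : Int) = (List.range 10).map (fun k : Nat => (k : Int)) := by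
    rw [show ((10:Int)) = ((10:Nat):Int) by norm_num, PySem.List.pyRange_zero_nat]
  rw [PySem.List.pyRange_zero_nat Zn, PySem.List.pyRange_zero_nat Cn, h10]
  simp only [List.flatMap_map, List.map_map, Function.comp_def]
  have e1 : ∀ zN lN : Nat,
      (List.range 10).flatMap (fun rN : Nat => (List.range Cn).map
        (fun cN : Nat => pvDeepPath (zN : Int) (lN : Int) (rN : Int) (cN : Int))) =
      (List.range (10 * Cn)).map (fun j : Nat => pvDeepPath (zN : Int) (lN : Int) ((j / Cn : Nat) : Int) ((j % Cn : Nat) : Int)) :=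
    fun zN lN => flatMap_range_const 10 Cn (fun r c => pvDeepPath (zN : Int) (lN : Int) (r : Int) (c : Int))
  simp only [e1]
  have e2 : ∀ zN : Nat,
      (List.range 10).flatMap (fun lN : Nat => (List.range (10 * Cn)).map
        (fun j : Nat => pvDeepPath (zN : Int) (lN : Int) ((j / Cn : Nat) : Int) ((j % Cn : Nat) : Int))) =
      (List.range (10 * (10 * Cn))).map (fun j : Nat => pvDeepPath (zN : Int) ((j / (10 * Cn) : Nat) : Int)
        ((j % (10 * Cn) / Cn : Nat) : Int) ((j % (10 * Cn) % Cn : Nat) : Int)) :=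
    fun zN => flatMap_range_const 10 (10 * Cn)
      (fun l j => pvDeepPath (zN : Int) (l : Int) ((j / Cn : Nat) : Int) ((j % Cn : Nat) : Int))
  simp only [e2]
  have e3 := flatMap_range_const Zn (10 * (10 * Cn))
      (fun z j => pvDeepPath (z : Int) ((j / (10 * Cn) : Nat) : Int)
        ((j % (10 * Cn) / Cn : Nat) : Int) ((j % (10 * Cn) % Cn : Nat) : Int))
  rw [e3]
  have harith : Zn * (10 * (10 * Cn)) = Zn * 100 * Cn := by ring
  rw [harith]
  refine List.map_congr_left ?_
  intro i _
  unfold dN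
  have hd1 : i / (10 * (10 * Cn)) = i / Cn / 10 / 10 := by
    rw [Nat.div_div_eq_div_mul, Nat.div_div_eq_div_mul]
    congr 1; ring
  have hd2 : i % (10 * (10 * Cn)) / (10 * Cn) = i / Cn / 10 % 10 := by
    have : (10 : Nat) * (10 * Cn) = (10 * Cn) * 10 := by ring
    rw [this, Nat.mod_mul_right_div_self, Nat.div_div_eq_div_mul, Nat.mul_comm Cn 10]
  have hd3 : i % (10 * (10 * Cn)) % (10 * Cn) / Cn = i / Cn % 10 := by
    rw [Nat.mod_mod_of_dvd _ ⟨10, by ring⟩]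
    have : (10 : Nat) * Cn = Cn * 10 := by ring
    rw [this, Nat.mod_mul_right_div_self]
  have hd4 : i % (10 * (10 * Cn)) % (10 * Cn) % Cn = i % Cn := by
    have hdvd1 : (10*Cn) ∣ (10*(10*Cn)) := ⟨10, by ring⟩
    have hdvd2 : Cn ∣ (10*Cn) := ⟨10, by ring⟩
    rw [Nat.mod_mod_of_dvd i hdvd1, Nat.mod_mod_of_dvd i hdvd2]
  rw [hd1, hd2, hd3, hd4]

theorem deep_eq (n : Int) : aDeep n = bDeep n := by
  unfold aDeep bDeep
  simp only []
  rw [show max 1 (PySem.Int.floordiv n 1000) * 10 * 10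
        = max 1 (PySem.Int.floordiv n 1000) * 100 from by ring]
  set z0 := max 1 (PySem.Int.floordiv n 1000) with hz0def
  set cpr := max 1 (PySem.Int.floordiv n (z0 * 100)) with hcprdef
  have hz1 : (1:Int) ≤ z0 := le_max_left _ _
  have hc1 : (1:Int) ≤ cpr := le_max_left _ _
  obtain ⟨Zn, hzc⟩ : ∃ m : Nat, z0 = (m:Int) := ⟨z0.toNat, by omega⟩
  obtain ⟨Cn, hcc⟩ : ∃ m : Nat, cpr = (m:Int) := ⟨cpr.toNat, by omega⟩
  have hC : ∀ (z l r : Int) (p : List String) (i : Int),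
      aLoopC n (fun c => pvDeepPath z l r c) (PySem.List.pyRange 0 cpr) (p, i) =
        (p ++ (gC cpr z l r).take (n - i).toNat,
         i + ((min (gC cpr z l r).length (n - i).toNat : Nat) : Int)) := by
    intro z l r p i
    rw [aLoopC_eq]
    simp [gC]
  have hR : ∀ (z l : Int) (p : List String) (i : Int),
      aBreakLoop n (fun r st =>
          aLoopC n (fun c => pvDeepPath z l r c) (PySem.List.pyRange 0 cpr) st)
          (PySem.List.pyRange 0 10) (p, i) =
        (p ++ (gR cpr z l).take (n - i).toNat,
         i + ((min (gR cpr z l).length (n - i).toNat : Nat) : Int)) := by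
    intro z l p i
    exact aBreakLoop_eq n _ (gC cpr z l) (fun r p i => hC z l r p i) _ p i
  have hL : ∀ (z : Int) (p : List String) (i : Int),
      aBreakLoop n (fun l st => aBreakLoop n (fun r st =>
          aLoopC n (fun c => pvDeepPath z l r c) (PySem.List.pyRange 0 cpr) st)
          (PySem.List.pyRange 0 10) st)
          (PySem.List.pyRange 0 10) (p, i) =
        (p ++ (gL cpr z).take (n - i).toNat,
         i + ((min (gL cpr z).length (n - i).toNat : Nat) : Int)) := by
    intro z p i
    exact aBreakLoop_eq n _ (gR cpr z) (fun l p i => hR z l p i) _ p i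
  have hZ :
      aBreakLoop n (fun z st => aBreakLoop n (fun l st => aBreakLoop n (fun r st =>
          aLoopC n (fun c => pvDeepPath z l r c) (PySem.List.pyRange 0 cpr) st)
          (PySem.List.pyRange 0 10) st) (PySem.List.pyRange 0 10) st)
          (PySem.List.pyRange 0 z0) ([], 0) =
        ([] ++ (fullList z0 cpr).take (n - 0).toNat,
         0 + ((min (fullList z0 cpr).length (n - 0).toNat : Nat) : Int)) :=
    aBreakLoop_eq n _ (gL cpr) (fun z p i => hL z p i) _ [] 0
  rw [hZ]
  simp only [List.nil_append, Int.sub_zero]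
  rw [hzc, hcc, fullList_eq Zn Cn, aFill_eq]
  have htot : (Zn : Int) * 100 * (Cn : Int) = ((Zn * 100 * Cn : Nat) : Int) := by
    push_cast; ring
  rw [htot]
  have hbody : (PySem.List.pyRange 0 (min n ((Zn * 100 * Cn : Nat) : Int))).map
        (fun idx => pvDeepPath
          (PySem.Int.floordiv (PySem.Int.floordiv (PySem.Int.floordiv idx ((Cn:Nat):Int)) 10) 10)
          (PySem.Int.mod (PySem.Int.floordiv (PySem.Int.floordiv idx ((Cn:Nat):Int)) 10) 10)
          (PySem.Int.mod (PySem.Int.floordiv idx ((Cn:Nat):Int)) 10)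
          (PySem.Int.mod idx ((Cn:Nat):Int))) =
      ((List.range (Zn * 100 * Cn)).map (dN Cn)).take n.toNat := by
    rw [← List.map_take, List.take_range]
    rw [PySem.List.pyRange_zero,
      show (min n ((Zn * 100 * Cn : Nat) : Int)).toNat = min n.toNat (Zn * 100 * Cn) from by omega]
    rw [List.map_map]
    refine List.map_congr_left ?_
    intro k _
    simp only [Function.comp_apply, PySem.Int.mod_natCast, PySem.Int.floordiv_natCast]
    rw [show (10:Int) = ((10:Nat):Int) from by norm_num]
    simp only [PySem.Int.mod_natCast, PySem.Int.floordiv_natCast]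
    rfl
  rw [hbody]
  by_cases hn : 0 ≤ n
  · rw [PySem.List.slice_to _ hn]
    apply List.take_of_length_le
    simp only [List.length_append, List.length_take, List.length_map, List.length_range,
      PySem.List.length_pyRange_one]
    omega
  · have h0 : n.toNat = 0 := by omega
    rw [h0]
    simp only [List.take_zero, List.length_nil, Nat.cast_zero, List.nil_append]
    rw [PySem.List.pyRange_one_eq_nil (by omega)]
    simp [PySem.List.slice]

-- ===== VERDICT (by name: the statement is the Claim_ definition above) =====
theorem generate_paths_spec : Claim_equal_generate_paths := by
  intro n hierarchy _hdom hpre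
  unfold Spec_generate_paths generate_paths generate_paths_alt
  rcases hpre with h | h <;> subst h
  · rfl
  · simp only [reduceIte, deep_eq]
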